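-- pv_equiv track=rewrite | github.com/rolandpg/zettelforge | benchmarks/cti_benchmark_v2.py | alias_match
-- ===== SOURCE A (Python) =====
-- ACTOR_ALIASES = {
--     "apt28": {"fancy bear", "sofacy", "strontium", "sednit", "iron twilight"},
--     "apt29": {"cozy bear", "the dukes", "nobelium", "midnight blizzard"},
--     "lazarus": {"hidden cobra", "zinc", "diamond sleet"},
--     "turla": {"snake", "venomous bear", "secret blizzard", "uroburos"},
--     "muddywater": {"mercury", "mango sandstorm", "static kitten", "seedworm"},
--     "volt typhoon": {"bronze silhouette", "vanguard panda"},
--     "sandworm": {"voodoo bear", "iridium", "seashell blizzard"},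
-- }
--
-- def alias_match(predicted: str, expected: str) -> bool:
--     """Check if predicted matches expected via alias resolution."""
--     pred = predicted.lower()
--     exp = expected.lower()
--     if exp in pred or pred in exp:
--         return True
--     for canonical, aliases in ACTOR_ALIASES.items():
--         if (exp == canonical or exp in aliases) and (
--             pred == canonical or pred in aliases or any(a in pred for a in aliases | {canonical})
--         ):
--             return True
--     return False
-- ===== SOURCE B (Python) =====
-- ACTOR_ALIASES = {
--     "apt28": {"fancy bear", "sofacy", "strontium", "sednit", "iron twilight"},
--     "apt29": {"cozy bear", "the dukes", "nobelium", "midnight blizzard"},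
--     "lazarus": {"hidden cobra", "zinc", "diamond sleet"},
--     "turla": {"snake", "venomous bear", "secret blizzard", "uroburos"},
--     "muddywater": {"mercury", "mango sandstorm", "static kitten", "seedworm"},
--     "volt typhoon": {"bronze silhouette", "vanguard panda"},
--     "sandworm": {"voodoo bear", "iridium", "seashell blizzard"},
-- }
--
-- # Reverse index: every canonical name and every alias -> its full group (aliases | {canonical}).
-- NAME_TO_GROUP = {}
-- for _canonical, _aliases in ACTOR_ALIASES.items():
--     _group = _aliases | {_canonical}
--     for _name in _group:
--         NAME_TO_GROUP[_name] = _group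
--
--
-- def alias_match(predicted: str, expected: str) -> bool:
--     """Check if predicted matches expected via alias resolution."""
--     pred = predicted.lower()
--     exp = expected.lower()
--     if exp in pred or pred in exp:
--         return True
--     group = NAME_TO_GROUP.get(exp)
--     if group is None:
--         return False
--     return any(a in pred for a in group)
-- ===== Notes on version B (the rewrite author's own statement) =====
-- stated objective: simpler
-- what changed: B precomputes once a reverse index NAME_TO_GROUP mapping every canonical name and alias to its full group, so each call does one dict lookup plus the substring tests instead of scanning all seven actor groups and re-deriving each group's union, and the redundant equality/alias clauses on the predicted side are dropped.
import Mathlib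
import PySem

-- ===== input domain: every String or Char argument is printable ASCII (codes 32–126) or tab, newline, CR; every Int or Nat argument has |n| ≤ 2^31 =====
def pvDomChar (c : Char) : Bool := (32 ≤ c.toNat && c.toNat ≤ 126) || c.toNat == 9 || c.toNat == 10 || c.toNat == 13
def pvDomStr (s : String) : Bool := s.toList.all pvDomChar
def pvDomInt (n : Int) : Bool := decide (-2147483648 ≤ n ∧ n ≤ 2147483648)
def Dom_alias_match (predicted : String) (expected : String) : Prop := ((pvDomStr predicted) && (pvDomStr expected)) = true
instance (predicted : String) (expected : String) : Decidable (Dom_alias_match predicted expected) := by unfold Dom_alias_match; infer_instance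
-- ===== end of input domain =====

-- B replaces A's per-call scan over all actor groups with a precomputed reverse index
-- (every name -> its full group), keeping the identical first substring guard; objective: simpler.

-- ===== PORT A =====
-- module constant ACTOR_ALIASES (dict canonical -> set of aliases)
def ACTOR_ALIASES : List (String × PySem.Set String) := [
  ("apt28", PySem.Set.ofList ["fancy bear", "sofacy", "strontium", "sednit", "iron twilight"]),
  ("apt29", PySem.Set.ofList ["cozy bear", "the dukes", "nobelium", "midnight blizzard"]),
  ("lazarus", PySem.Set.ofList ["hidden cobra", "zinc", "diamond sleet"]),
  ("turla", PySem.Set.ofList ["snake", "venomous bear", "secret blizzard", "uroburos"]),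
  ("muddywater", PySem.Set.ofList ["mercury", "mango sandstorm", "static kitten", "seedworm"]),
  ("volt typhoon", PySem.Set.ofList ["bronze silhouette", "vanguard panda"]),
  ("sandworm", PySem.Set.ofList ["voodoo bear", "iridium", "seashell blizzard"])]

-- the for-loop over .items() with early 'return True' / final 'return False' is List.any
def alias_match (predicted : String) (expected : String) : Bool :=
  let pred := PySem.Str.lower predicted
  let exp := PySem.Str.lower expected
  if PySem.Str.isIn exp pred || PySem.Str.isIn pred exp then true
  else ACTOR_ALIASES.any (fun ce =>
    (exp == ce.1 || PySem.Set.contains ce.2 exp) &&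
    (pred == ce.1 || PySem.Set.contains ce.2 pred ||
      (PySem.Set.union ce.2 [ce.1]).any (fun a => PySem.Str.isIn a pred)))

-- ===== PORT B =====
-- module-level loop of Source B building the reverse index NAME_TO_GROUP
def NAME_TO_GROUP : PySem.Dict String (PySem.Set String) :=
  ACTOR_ALIASES.foldl (fun d ce =>
    let group := PySem.Set.union ce.2 [ce.1]
    group.foldl (fun d n => PySem.Dict.insert d n group) d) PySem.Dict.empty

def alias_match_alt (predicted : String) (expected : String) : Bool :=
  let pred := PySem.Str.lower predicted
  let exp := PySem.Str.lower expected
  if PySem.Str.isIn exp pred || PySem.Str.isIn pred exp then true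
  else match PySem.Dict.get? NAME_TO_GROUP exp with
       | none => false
       | some group => group.any (fun a => PySem.Str.isIn a pred)

-- ===== PRECONDITION & SPEC =====
def Spec_alias_match (predicted : String) (expected : String) (out : Bool) : Prop := out = alias_match_alt predicted expected
instance (predicted : String) (expected : String) (out : Bool) : Decidable (Spec_alias_match predicted expected out) := by unfold Spec_alias_match; infer_instance

-- ===== CLAIM (what is proved, stated in full; the proofs are below) =====
def Claim_equal_alias_match : Prop := ∀ (predicted : String) (expected : String), Dom_alias_match predicted expected → Spec_alias_match predicted expected (alias_match predicted expected)

-- ===== LEMMAS AND PROOFS =====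

-- the full group of an actor entry: aliases | {canonical}
def pvBlk (ce : String × List String) : List String := PySem.Set.union ce.2 [ce.1]

-- the items of the reverse index: one block of (name, group) pairs per actor entry
def pvFlat (G : List (String × List String)) : List (String × List String) :=
  G.flatMap (fun ce => (pvBlk ce).map (fun n => (n, pvBlk ce)))

theorem isIn_self (s : String) : PySem.Str.isIn s s = true := by
  rw [PySem.Str.isIn_iff_infix]

theorem any_congr_mem {α : Type} {l : List α} {p q : α → Bool}
    (h : ∀ a ∈ l, p a = q a) : l.any p = l.any q := by
  induction l with
  | nil => rfl
  | cons x t ih =>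
    rw [List.any_cons, List.any_cons, h x (by simp), ih (fun a ha => h a (by simp [ha]))]

theorem get?_mk_append {ν : Type} (l1 l2 : List (String × ν)) (x : String) :
    (PySem.Dict.mk (l1 ++ l2)).get? x =
      ((PySem.Dict.mk l1).get? x).or ((PySem.Dict.mk l2).get? x) := by
  induction l1 with
  | nil => simp [PySem.Dict.get?]
  | cons p t ih =>
    rw [List.cons_append, PySem.Dict.get?_mk_cons, PySem.Dict.get?_mk_cons]
    cases h : (p.1 == x)
    · simp [ih]
    · simp

theorem get?_mk_block {ν : Type} (g : List String) (v : ν) (x : String) :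
    (PySem.Dict.mk (g.map (fun n => (n, v)))).get? x =
      if g.contains x then some v else none := by
  induction g with
  | nil => simp [PySem.Dict.get?]
  | cons n t ih =>
    rw [List.map_cons, PySem.Dict.get?_mk_cons, ih]
    by_cases h : n = x
    · subst h; simp
    · have h1 : (n == x) = false := beq_eq_false_iff_ne.mpr h
      have h2 : ¬ x = n := fun hh => h hh.symm
      simp [h1, h2]

-- A's scan over disjoint groups equals first-match lookup in the concatenated index
theorem gen_scan_eq_lookup (G : List (String × List String)) (exp pred : String)
    (hdis : G.Pairwise (fun a b => ∀ x ∈ pvBlk a, x ∉ pvBlk b)) :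
    G.any (fun ce => (pvBlk ce).contains exp && (pvBlk ce).any (fun a => PySem.Str.isIn a pred))
    = (match (PySem.Dict.mk (pvFlat G)).get? exp with
       | none => false
       | some g => g.any (fun a => PySem.Str.isIn a pred)) := by
  induction G with
  | nil => simp [pvFlat, PySem.Dict.get?]
  | cons ce t ih =>
    have hdt := (List.pairwise_cons.mp hdis).2
    have hhd := (List.pairwise_cons.mp hdis).1
    have hfl : pvFlat (ce :: t) = ((pvBlk ce).map (fun n => (n, pvBlk ce))) ++ pvFlat t := by
      simp [pvFlat]
    rw [hfl, get?_mk_append, get?_mk_block, List.any_cons]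
    by_cases hm : exp ∈ pvBlk ce
    · have hmc : (pvBlk ce).contains exp = true := by simpa using hm
      have hnot : ∀ x ∈ t, exp ∉ pvBlk x := fun x hx => hhd x hx exp hm
      have hrest : (t.any fun ce => (pvBlk ce).contains exp &&
          ((pvBlk ce).any fun a => PySem.Str.isIn a pred)) = false :=
        List.any_eq_false.mpr (fun x hx => by simp [hnot x hx])
      rw [if_pos hmc, Option.some_or, hrest, hmc]
      simp
    · have hmc : (pvBlk ce).contains exp = false := by simpa using hm
      rw [if_neg (by simpa using hm), Option.none_or, hmc, Bool.false_and, Bool.false_or]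
      exact ih hdt

-- membership/absorption: A's per-group test equals the block form
theorem elem_conv (c : String) (al : List String) (h : al.contains c = false)
    (exp pred : String) :
    ((exp == c || PySem.Set.contains al exp) &&
     (pred == c || PySem.Set.contains al pred ||
       (PySem.Set.union al [c]).any (fun a => PySem.Str.isIn a pred)))
    = ((PySem.Set.union al [c]).contains exp &&
       (PySem.Set.union al [c]).any (fun a => PySem.Str.isIn a pred)) := by
  have hc : c ∉ al := by simpa using h
  have hu : PySem.Set.union al [c] = al ++ [c] := by
    simp [PySem.Set.union, PySem.Set.update, PySem.Set.add, hc]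
  rw [hu]
  have h1 : (exp == c || PySem.Set.contains al exp) = (al ++ [c]).contains exp := by
    by_cases he : exp = c
    · subst he; simp
    · have hb : (exp == c) = false := beq_eq_false_iff_ne.mpr he
      simp [hb, PySem.Set.contains, he]
  rw [h1]
  congr 1
  by_cases hp : pred = c
  · have hx : ((al ++ [c]).any fun a => PySem.Str.isIn a pred) = true :=
      List.any_eq_true.mpr ⟨c, by simp, by rw [hp]; exact isIn_self c⟩
    have hb : (pred == c) = true := by rw [hp]; simp
    rw [hx, hb]; simp
  · by_cases hal : pred ∈ al
    · have hx : ((al ++ [c]).any fun a => PySem.Str.isIn a pred) = true :=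
        List.any_eq_true.mpr ⟨pred, by simp [hal], isIn_self pred⟩
      rw [hx]; simp
    · have hb : (pred == c) = false := beq_eq_false_iff_ne.mpr hp
      have hb2 : PySem.Set.contains al pred = false := by simp [PySem.Set.contains, hal]
      rw [hb, hb2]; simp

theorem NAME_TO_GROUP_eq : NAME_TO_GROUP = PySem.Dict.mk (pvFlat ACTOR_ALIASES) := by decide

theorem loop_eq_lookup (exp pred : String) :
    ACTOR_ALIASES.any (fun ce =>
      (exp == ce.1 || PySem.Set.contains ce.2 exp) &&
      (pred == ce.1 || PySem.Set.contains ce.2 pred ||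
        (PySem.Set.union ce.2 [ce.1]).any (fun a => PySem.Str.isIn a pred))) =
    (match PySem.Dict.get? NAME_TO_GROUP exp with
     | none => false
     | some group => group.any (fun a => PySem.Str.isIn a pred)) := by
  have hcv : ∀ ce ∈ ACTOR_ALIASES,
      ((exp == ce.1 || PySem.Set.contains ce.2 exp) &&
       (pred == ce.1 || PySem.Set.contains ce.2 pred ||
         (PySem.Set.union ce.2 [ce.1]).any (fun a => PySem.Str.isIn a pred)))
      = ((pvBlk ce).contains exp && (pvBlk ce).any (fun a => PySem.Str.isIn a pred)) := by
    intro ce hce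
    have hnc : ce.2.contains ce.1 = false := by
      fin_cases hce <;> decide
    exact elem_conv ce.1 ce.2 hnc exp pred
  rw [any_congr_mem hcv, NAME_TO_GROUP_eq]
  exact gen_scan_eq_lookup ACTOR_ALIASES exp pred (by decide)

-- ===== VERDICT (by name: the statement is the Claim_ definition above) =====
theorem alias_match_spec : Claim_equal_alias_match := by
  intro predicted expected _
  show alias_match predicted expected = alias_match_alt predicted expected
  dsimp only [alias_match, alias_match_alt]
  split
  · rfl
  · exact loop_eq_lookup _ _
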